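-- pv_equiv track=rewrite | github.com/chanson9/google_foobar_challenge | ch2_lambs/solution.py | solution
-- ===== SOURCE A (Python) =====
-- def solution(total_lambs):
--     """total_lambs is the integer number of LAMBs you are trying to divide.
--     It should return an integer which represents the difference between
--     the minimum and maximum number of henchmen who can share the LAMBs"""
--
--     if(total_lambs < 1):
--         return 0
--
--     if total_lambs > 10**9:
--         return 0
--
--     # if there was only 1 total lamb to distribute, just return 0
--     if total_lambs == 1:
--         return 0
--
--     # calculate the stingy payout list using fibonacci
--     generous_list = []
--     hench_ctr1 = 0
--     generous_sum = 0
--     out_of_lambs = False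
--     while not out_of_lambs:
--         payout = 2**hench_ctr1
--         generous_sum = generous_sum + payout
--         if generous_sum > total_lambs:
--             out_of_lambs = True  # break out of the loop
--             break
--         generous_list.append(payout)  # add payout to the list
--         hench_ctr1 = hench_ctr1 + 1
--
--     # calculate the stingy payout
--     stingy_list = [1, 1]
--     stingy_sum = 2
--     hench_ctr2 = 2
--     out_of_lambs = False
--     while not out_of_lambs:
--         # calculate the next number in the fibonacci
--         payout = stingy_list[hench_ctr2-1] + stingy_list[hench_ctr2-2]
--         stingy_sum = stingy_sum + int(payout)
--         if stingy_sum > total_lambs: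
--             out_of_lambs = True  # break out of the loop
--             break
--         stingy_list.append(payout)  # add payout to the list
--         hench_ctr2 = hench_ctr2 + 1
--
--     # return the difference between the length of lists
--     return len(stingy_list) - len(generous_list)
-- ===== SOURCE B (Python) =====
-- def solution(total_lambs):
--     """Same result as A: difference between stingy (Fibonacci) and generous
--     (powers-of-two) henchman counts, with the same three guard returns."""
--     if total_lambs < 1 or total_lambs > 10**9 or total_lambs == 1:
--         return 0
--     # generous count in closed form: largest k with 2**k - 1 <= total_lambs
--     generous = (total_lambs + 1).bit_length() - 1
--     # stingy count with two rolling Fibonacci variables, no list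
--     a, b, s, stingy = 1, 1, 2, 2
--     while s + a + b <= total_lambs:
--         a, b = b, a + b
--         s += b
--         stingy += 1
--     return stingy - generous
-- ===== Notes on version B (the rewrite author's own statement) =====
-- stated objective: simpler
-- what changed: The generous powers-of-two loop with its list is replaced by the closed-form bit length of total_lambs plus one, minus one, and the Fibonacci list is replaced by two rolling variables with a running sum and counter.
import Mathlib
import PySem

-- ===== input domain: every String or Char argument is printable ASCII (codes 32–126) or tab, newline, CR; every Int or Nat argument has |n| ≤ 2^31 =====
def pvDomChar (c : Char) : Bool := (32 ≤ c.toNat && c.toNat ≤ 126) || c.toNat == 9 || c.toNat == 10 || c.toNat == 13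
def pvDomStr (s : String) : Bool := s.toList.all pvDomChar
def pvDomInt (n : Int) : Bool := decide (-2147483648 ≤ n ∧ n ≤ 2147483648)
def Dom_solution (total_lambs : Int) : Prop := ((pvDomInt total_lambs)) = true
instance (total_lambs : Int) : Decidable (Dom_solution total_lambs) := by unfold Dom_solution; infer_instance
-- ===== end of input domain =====

-- B replaces A's powers-of-two list loop by a closed-form bit-length count and A's
-- Fibonacci list by two rolling variables (objective: simpler).

-- ===== PORT A =====
-- the generous (powers-of-two) while loop; fuel only makes it total, the loop
-- always breaks first on the admitted inputs (2^100 > 10^9)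
def aGenLoop (total : Int) (fuel : Nat) (ctr : Nat) (gsum : Int) (lst : List Int) : List Int :=
  match fuel with
  | 0 => lst
  | f + 1 =>
    let payout : Int := 2 ^ ctr
    let gsum' := gsum + payout
    if gsum' > total then lst
    else aGenLoop total f (ctr + 1) gsum' (lst ++ [payout])

-- the stingy (Fibonacci) while loop; ctr = lst.length ≥ 2 throughout, so the
-- getD indices are exactly Python's in-range stingy_list[ctr-1], stingy_list[ctr-2]
def aStingyLoop (total : Int) (fuel : Nat) (ctr : Nat) (ssum : Int) (lst : List Int) : List Int :=
  match fuel with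
  | 0 => lst
  | f + 1 =>
    let payout : Int := lst.getD (ctr - 1) 0 + lst.getD (ctr - 2) 0
    let ssum' := ssum + payout
    if ssum' > total then lst
    else aStingyLoop total f (ctr + 1) ssum' (lst ++ [payout])

def solution (total_lambs : Int) : Int :=
  if total_lambs < 1 then 0
  else if total_lambs > 10 ^ 9 then 0
  else if total_lambs = 1 then 0
  else
    ((aStingyLoop total_lambs 100 2 2 [1, 1]).length : Int)
      - ((aGenLoop total_lambs 100 0 0 []).length : Int)

-- ===== PORT B =====
-- Source B's while loop with two rolling Fibonacci variables; same fuel remark as above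
def bStingyLoop (total : Int) (fuel : Nat) (a b s count : Int) : Int :=
  match fuel with
  | 0 => count
  | f + 1 =>
    if s + a + b ≤ total then bStingyLoop total f b (a + b) (s + a + b) (count + 1)
    else count

def solution_alt (total_lambs : Int) : Int :=
  if total_lambs < 1 ∨ total_lambs > 10 ^ 9 ∨ total_lambs = 1 then 0
  else
    -- (total_lambs + 1).bit_length() - 1 = Nat.size of the (positive) argument, minus 1
    bStingyLoop total_lambs 100 1 1 2 2 - (((total_lambs + 1).toNat.size : Int) - 1)

-- ===== PRECONDITION & SPEC =====
def Spec_solution (total_lambs : Int) (out : Int) : Prop := out = solution_alt total_lambs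
instance (total_lambs : Int) (out : Int) : Decidable (Spec_solution total_lambs out) := by unfold Spec_solution; infer_instance

-- ===== CLAIM (what is proved, stated in full; the proofs are below) =====
def Claim_equal_solution : Prop := ∀ (total_lambs : Int), Dom_solution total_lambs → Spec_solution total_lambs (solution total_lambs)

-- ===== LEMMAS AND PROOFS =====

-- A's generous loop ends with exactly (total+1).toNat.size - 1 payouts
lemma gen_len (total : Int) (ht : 2 ≤ total) :
    ∀ (fuel ctr : Nat) (lst : List Int), lst.length = ctr →
      ctr < (total + 1).toNat.size → total + 1 < (2 : Int) ^ (ctr + fuel) →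
      (aGenLoop total fuel ctr ((2 : Int) ^ ctr - 1) lst).length
        = (total + 1).toNat.size - 1 := by
  intro fuel
  induction fuel with
  | zero =>
    intro ctr lst hlen hctr hpow
    -- the loop cannot be at this state: 2^ctr ≤ total+1 (from ctr < size) but total < 2^ctr
    exfalso
    have h1 : 2 ^ ctr ≤ (total + 1).toNat := Nat.lt_size.mp hctr
    have h2 : ((2 : Nat) ^ ctr : Int) ≤ total + 1 := by
      have := Int.toNat_of_nonneg (show (0:Int) ≤ total + 1 by omega)
      omega
    push_cast at h2
    simp only [Nat.add_zero] at hpow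
    omega
  | succ f ih =>
    intro ctr lst hlen hctr hpow
    unfold aGenLoop
    simp only
    by_cases hbr : (2 : Int) ^ ctr - 1 + 2 ^ ctr > total
    · rw [if_pos hbr]
      -- the loop breaks now: total + 1 ≤ 2^(ctr+1), so size ≤ ctr+1, so ctr = size - 1
      have h2 : (total + 1).toNat < 2 ^ (ctr + 1) := by
        have hp : ((2:Nat) ^ (ctr+1) : Int) = 2 ^ ctr + 2 ^ ctr := by push_cast; ring
        have := Int.toNat_of_nonneg (show (0:Int) ≤ total + 1 by omega)
        omega
      have h3 : (total + 1).toNat.size ≤ ctr + 1 := Nat.size_le.mpr h2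
      omega
    · rw [if_neg hbr]
      simp only [not_lt] at hbr
      have hsum : (2 : Int) ^ ctr - 1 + 2 ^ ctr = 2 ^ (ctr + 1) - 1 := by ring
      have hctr' : ctr + 1 < (total + 1).toNat.size := by
        apply Nat.lt_size.mpr
        have hp : ((2:Nat) ^ (ctr+1) : Int) = 2 ^ ctr + 2 ^ ctr := by push_cast; ring
        have := Int.toNat_of_nonneg (show (0:Int) ≤ total + 1 by omega)
        omega
      have hpow' : total + 1 < (2 : Int) ^ (ctr + 1 + f) := by
        have : ctr + 1 + f = ctr + (f + 1) := by omega
        rw [this]; exact hpow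
      have := ih (ctr + 1) (lst ++ [2 ^ ctr]) (by simp [hlen]) hctr' hpow'
      rw [hsum]
      exact this

-- A's stingy loop tracks B's two rolling variables: same length/count at every step
lemma stingy_eq (total : Int) :
    ∀ (fuel : Nat) (a b s : Int) (lst : List Int) (ctr : Nat), 2 ≤ ctr →
      lst.length = ctr → lst.getD (ctr - 2) 0 = a → lst.getD (ctr - 1) 0 = b →
      ((aStingyLoop total fuel ctr s lst).length : Int) = bStingyLoop total fuel a b s (ctr : Int) := by
  intro fuel
  induction fuel with
  | zero =>
    intro a b s lst ctr h2 hlen ha hb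
    simp [aStingyLoop, bStingyLoop, hlen]
  | succ f ih =>
    intro a b s lst ctr h2 hlen ha hb
    unfold aStingyLoop bStingyLoop
    simp only [ha, hb]
    by_cases hbr : s + (b + a) > total
    · rw [if_pos hbr, if_neg (by omega)]
      simp [hlen]
    · rw [if_neg hbr, if_pos (by omega)]
      have hgd1 : (lst ++ [b + a]).getD (ctr + 1 - 2) 0 = b := by
        rw [show ctr + 1 - 2 = ctr - 1 by omega]
        rw [List.getD_eq_getElem?_getD, List.getElem?_append_left (by omega),
          ← List.getD_eq_getElem?_getD]
        exact hb
      have hgd2 : (lst ++ [b + a]).getD (ctr + 1 - 1) 0 = a + b := by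
        simp only [Nat.add_sub_cancel]
        rw [List.getD_eq_getElem?_getD, List.getElem?_append_right (by omega)]
        simp [hlen]
        ring
      have := ih b (a + b) (s + a + b) (lst ++ [b + a]) (ctr + 1) (by omega)
        (by simp [hlen]) hgd1 hgd2
      rw [show s + (b + a) = s + a + b by ring]
      rw [this]
      push_cast
      ring_nf

-- ===== VERDICT (by name: the statement is the Claim_ definition above) =====
theorem solution_spec : Claim_equal_solution := by
  unfold Claim_equal_solution
  intro total _
  unfold Spec_solution solution solution_alt
  by_cases h1 : total < 1
  · rw [if_pos h1, if_pos (Or.inl h1)]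
  · by_cases h2 : total > 10 ^ 9
    · rw [if_neg h1, if_pos h2, if_pos (Or.inr (Or.inl h2))]
    · by_cases h3 : total = 1
      · rw [if_neg h1, if_neg h2, if_pos h3, if_pos (Or.inr (Or.inr h3))]
      · rw [if_neg h1, if_neg h2, if_neg h3, if_neg (by omega)]
        have ht : 2 ≤ total := by omega
        have hsize2 : 2 ≤ (total + 1).toNat.size := by
          apply Nat.lt_size.mpr
          have := Int.toNat_of_nonneg (show (0:Int) ≤ total + 1 by omega)
          omega
        have hgen := gen_len total ht 100 0 [] rfl (by omega)
          (by have : ((2:Int) ^ (0 + 100)) = 1267650600228229401496703205376 := by norm_num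
              omega)
        have hsting := stingy_eq total 100 1 1 2 [1, 1] 2 (by omega) rfl rfl rfl
        norm_num at hgen hsting
        omega
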